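-- pv_equiv track=rewrite | github.com/aryawaikar/aquaconnect | backend/services/recommendation.py | get_city_from_input
-- ===== SOURCE A (Python) =====
-- CITY_CONFIG = {
--     "Pune": [
--         "Kothrud", "Baner", "Wakad", "Hinjewadi",
--         "Shivajinagar", "Hadapsar", "Viman Nagar", "Katraj"
--     ],
--     "Mumbai": [
--         "Andheri", "Bandra", "Borivali", "Colaba",
--         "Juhu", "Powai", "Thane", "Navi Mumbai", "Dadar", "Worli"
--     ]
-- }
--
-- def get_city_from_input(user_input: str) -> str:
--     val = user_input.lower().strip()
--     for city, areas in CITY_CONFIG.items():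
--         if city.lower() == val:
--             return city
--         for area in areas:
--             if area.lower() == val:
--                 return city
--     return "Pune"  # Default fallback
-- ===== SOURCE B (Python) =====
-- CITY_CONFIG = {
--     "Pune": [
--         "Kothrud", "Baner", "Wakad", "Hinjewadi",
--         "Shivajinagar", "Hadapsar", "Viman Nagar", "Katraj"
--     ],
--     "Mumbai": [
--         "Andheri", "Bandra", "Borivali", "Colaba",
--         "Juhu", "Powai", "Thane", "Navi Mumbai", "Dadar", "Worli"
--     ]
-- }
--
-- # Since the fallback city is "Pune", Pune's own names need not be stored at all:
-- # the answer is "Mumbai" exactly when the input names Mumbai or one of its areas.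
-- _MUMBAI_NAMES = frozenset(
--     name.lower() for name in ("Mumbai", *CITY_CONFIG["Mumbai"]))
--
--
-- def get_city_from_input(user_input: str) -> str:
--     return "Mumbai" if user_input.lower().strip() in _MUMBAI_NAMES else "Pune"
-- ===== Notes on version B (the rewrite author's own statement) =====
-- stated objective: simpler
-- what changed: B drops the name-to-city mapping entirely: because the fallback is 'Pune', the function reduces to one membership test of the normalized input against a frozenset of the Mumbai-side names (Pune's names are never stored or scanned).
import Mathlib
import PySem

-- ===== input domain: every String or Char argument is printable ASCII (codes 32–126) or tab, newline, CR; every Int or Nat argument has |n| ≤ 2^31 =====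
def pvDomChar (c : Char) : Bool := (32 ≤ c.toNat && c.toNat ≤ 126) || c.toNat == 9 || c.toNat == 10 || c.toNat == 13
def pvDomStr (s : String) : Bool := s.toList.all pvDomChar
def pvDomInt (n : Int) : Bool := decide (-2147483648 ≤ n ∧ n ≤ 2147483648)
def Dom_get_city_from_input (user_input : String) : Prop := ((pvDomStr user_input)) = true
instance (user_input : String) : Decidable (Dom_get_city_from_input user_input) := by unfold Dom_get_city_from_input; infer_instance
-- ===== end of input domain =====

-- B drops the name→city mapping: since the fallback is "Pune", the result is
-- "Mumbai" iff the normalized input is a Mumbai-side name — one membership test (simpler).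


-- ===== PORT A =====
def cityConfig : List (String × List String) :=
  [("Pune", ["Kothrud", "Baner", "Wakad", "Hinjewadi",
             "Shivajinagar", "Hadapsar", "Viman Nagar", "Katraj"]),
   ("Mumbai", ["Andheri", "Bandra", "Borivali", "Colaba",
               "Juhu", "Powai", "Thane", "Navi Mumbai", "Dadar", "Worli"])]

-- inner 'for area in areas' loop: true iff some area.lower() == val
def areaMatches (areas : List String) (val : String) : Bool :=
  match areas with
  | [] => false
  | a :: rest => if PySem.Str.lower a == val then true else areaMatches rest val

-- outer 'for city, areas in CITY_CONFIG.items()' loop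
def findCity (cfg : List (String × List String)) (val : String) : String :=
  match cfg with
  | [] => "Pune"  -- default fallback
  | (city, areas) :: rest =>
      if PySem.Str.lower city == val then city
      else if areaMatches areas val then city
      else findCity rest val

def get_city_from_input (user_input : String) : String :=
  let val := PySem.Str.strip (PySem.Str.lower user_input)
  findCity cityConfig val

-- ===== PORT B =====
-- frozenset(name.lower() for name in ("Mumbai", *CITY_CONFIG["Mumbai"]))
def mumbaiNames : PySem.Set String :=
  PySem.Set.ofList
    (("Mumbai" :: ["Andheri", "Bandra", "Borivali", "Colaba",
                   "Juhu", "Powai", "Thane", "Navi Mumbai", "Dadar", "Worli"]).map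
      PySem.Str.lower)

def get_city_from_input_alt (user_input : String) : String :=
  if mumbaiNames.contains (PySem.Str.strip (PySem.Str.lower user_input)) then "Mumbai"
  else "Pune"

-- ===== PRECONDITION & SPEC =====
def Spec_get_city_from_input (user_input : String) (out : String) : Prop := out = get_city_from_input_alt user_input
instance (user_input : String) (out : String) : Decidable (Spec_get_city_from_input user_input out) := by unfold Spec_get_city_from_input; infer_instance

-- ===== CLAIM (what is proved, stated in full; the proofs are below) =====
def Claim_equal_get_city_from_input : Prop := ∀ (user_input : String), Dom_get_city_from_input user_input → Spec_get_city_from_input user_input (get_city_from_input user_input)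

-- ===== LEMMAS AND PROOFS =====

-- B's set, evaluated once to its literal lowered elements (all distinct).
theorem mumbaiNames_eval : mumbaiNames =
    ["mumbai","andheri","bandra","borivali","colaba","juhu","powai","thane",
     "navi mumbai","dadar","worli"] := by decide

-- For any (already lowered+stripped) key, A's nested scan over both cities equals
-- B's single membership test: every Pune-side match of A returns the fallback value
-- "Pune" anyway, so only Mumbai-side membership decides the result.
theorem findCity_eq_member (val : String) :
    findCity cityConfig val =
      (if mumbaiNames.contains val then "Mumbai" else "Pune") := by
  rw [mumbaiNames_eval]
  simp only [cityConfig, findCity, areaMatches, PySem.Set.contains, List.contains,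
    show PySem.Str.lower "Pune" = "pune" from rfl,
    show PySem.Str.lower "Kothrud" = "kothrud" from rfl,
    show PySem.Str.lower "Baner" = "baner" from rfl,
    show PySem.Str.lower "Wakad" = "wakad" from rfl,
    show PySem.Str.lower "Hinjewadi" = "hinjewadi" from rfl,
    show PySem.Str.lower "Shivajinagar" = "shivajinagar" from rfl,
    show PySem.Str.lower "Hadapsar" = "hadapsar" from rfl,
    show PySem.Str.lower "Viman Nagar" = "viman nagar" from rfl,
    show PySem.Str.lower "Katraj" = "katraj" from rfl,
    show PySem.Str.lower "Mumbai" = "mumbai" from rfl,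
    show PySem.Str.lower "Andheri" = "andheri" from rfl,
    show PySem.Str.lower "Bandra" = "bandra" from rfl,
    show PySem.Str.lower "Borivali" = "borivali" from rfl,
    show PySem.Str.lower "Colaba" = "colaba" from rfl,
    show PySem.Str.lower "Juhu" = "juhu" from rfl,
    show PySem.Str.lower "Powai" = "powai" from rfl,
    show PySem.Str.lower "Thane" = "thane" from rfl,
    show PySem.Str.lower "Navi Mumbai" = "navi mumbai" from rfl,
    show PySem.Str.lower "Dadar" = "dadar" from rfl,
    show PySem.Str.lower "Worli" = "worli" from rfl]
  by_cases h0 : "pune" = val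
  · subst h0; decide
  by_cases h1 : "kothrud" = val
  · subst h1; decide
  by_cases h2 : "baner" = val
  · subst h2; decide
  by_cases h3 : "wakad" = val
  · subst h3; decide
  by_cases h4 : "hinjewadi" = val
  · subst h4; decide
  by_cases h5 : "shivajinagar" = val
  · subst h5; decide
  by_cases h6 : "hadapsar" = val
  · subst h6; decide
  by_cases h7 : "viman nagar" = val
  · subst h7; decide
  by_cases h8 : "katraj" = val
  · subst h8; decide
  by_cases h9 : "mumbai" = val
  · subst h9; decide
  by_cases h10 : "andheri" = val
  · subst h10; decide
  by_cases h11 : "bandra" = val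
  · subst h11; decide
  by_cases h12 : "borivali" = val
  · subst h12; decide
  by_cases h13 : "colaba" = val
  · subst h13; decide
  by_cases h14 : "juhu" = val
  · subst h14; decide
  by_cases h15 : "powai" = val
  · subst h15; decide
  by_cases h16 : "thane" = val
  · subst h16; decide
  by_cases h17 : "navi mumbai" = val
  · subst h17; decide
  by_cases h18 : "dadar" = val
  · subst h18; decide
  by_cases h19 : "worli" = val
  · subst h19; decide
  simp [h0, h1, h2, h3, h4, h5, h6, h7, h8, h9, Ne.symm h9, h10, Ne.symm h10, h11, Ne.symm h11, h12, Ne.symm h12, h13, Ne.symm h13, h14, Ne.symm h14, h15, Ne.symm h15, h16, Ne.symm h16, h17, Ne.symm h17, h18, Ne.symm h18, h19, Ne.symm h19]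

-- ===== VERDICT (by name: the statement is the Claim_ definition above) =====
theorem get_city_from_input_spec : Claim_equal_get_city_from_input := by
  intro u _
  unfold Spec_get_city_from_input get_city_from_input get_city_from_input_alt
  exact findCity_eq_member _
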